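-- pv_equiv track=rewrite | github.com/trippmorgan/plaudai_uploader | backend/_legacy/pdf_generator.py | parse_synopsis_sections
-- ===== SOURCE A (Python) =====
-- from typing import Dict, Optional
--
-- def parse_synopsis_sections(text: str) -> Dict[str, str]:
--     """Parse structured sections from synopsis text"""
--     sections = {}
--     current_section = None
--     current_content = []
--
--     section_headers = [
--         'CHIEF COMPLAINT', 'HISTORY OF PRESENT ILLNESS', 'HPI',
--         'PAST MEDICAL HISTORY', 'PMH', 'MEDICATIONS', 'ALLERGIES',
--         'SOCIAL HISTORY', 'PHYSICAL EXAMINATION', 'PHYSICAL EXAM',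
--         'ASSESSMENT', 'PLAN', 'ASSESSMENT AND PLAN'
--     ]
--
--     for line in text.split('\n'):
--         line_upper = line.strip().upper()
--
--         # Check if line is a section header
--         if any(header in line_upper for header in section_headers):
--             # Save previous section
--             if current_section and current_content:
--                 sections[current_section] = '\n'.join(current_content).strip()
--
--             current_section = line.strip().rstrip(':')
--             current_content = []
--         elif current_section and line.strip():
--             current_content.append(line.strip())
--
--     # Save last section
--     if current_section and current_content:
--         sections[current_section] = '\n'.join(current_content).strip()
--
--     return sections
-- ===== SOURCE B (Python) =====
-- # B: chunk-consuming nested loops (skip to a header, eat its body in an inner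
-- # loop, insert) instead of A's flat one-line-at-a-time state machine.
-- def parse_synopsis_sections(text):
--     section_headers = [
--         'CHIEF COMPLAINT', 'HISTORY OF PRESENT ILLNESS', 'HPI',
--         'PAST MEDICAL HISTORY', 'PMH', 'MEDICATIONS', 'ALLERGIES',
--         'SOCIAL HISTORY', 'PHYSICAL EXAMINATION', 'PHYSICAL EXAM',
--         'ASSESSMENT', 'PLAN', 'ASSESSMENT AND PLAN'
--     ]
--
--     def is_header(line):
--         u = line.strip().upper()
--         return any(h in u for h in section_headers)
--
--     sections = {}
--     rest = text.split('\n')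
--     while rest:
--         line, rest = rest[0], rest[1:]
--         if not is_header(line):
--             continue
--         body = []
--         while rest and not is_header(rest[0]):
--             body.append(rest[0].strip())
--             rest = rest[1:]
--         body = [s for s in body if s]
--         if body:
--             sections[line.strip().rstrip(':')] = '\n'.join(body).strip()
--     return sections
-- ===== Notes on version B (the rewrite author's own statement) =====
-- stated objective: alternative
-- what changed: Replaced A's flat line-by-line state machine (carrying current_section/current_content across iterations) with nested chunk-consuming loops: skip to the next header line, consume its body lines in an inner loop, insert the section, repeat; no per-line carried section state.
import Mathlib
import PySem

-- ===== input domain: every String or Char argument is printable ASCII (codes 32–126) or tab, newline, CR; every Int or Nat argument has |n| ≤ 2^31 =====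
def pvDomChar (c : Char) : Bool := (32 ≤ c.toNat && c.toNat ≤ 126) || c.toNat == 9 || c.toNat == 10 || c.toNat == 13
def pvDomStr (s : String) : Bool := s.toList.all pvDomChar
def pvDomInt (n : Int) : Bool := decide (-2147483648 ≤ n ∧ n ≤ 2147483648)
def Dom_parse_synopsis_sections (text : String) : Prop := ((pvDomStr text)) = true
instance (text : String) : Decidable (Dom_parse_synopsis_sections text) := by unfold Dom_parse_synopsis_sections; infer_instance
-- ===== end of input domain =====

-- B replaces A's flat per-line state machine by nested chunk-consuming loops
-- (skip to a header line, eat its body in an inner loop, insert the section);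
-- an alternative decomposition proved to return the same value.


-- the literal 'section_headers' list both Pythons carry
def pvHeaders : List String :=
  ["CHIEF COMPLAINT", "HISTORY OF PRESENT ILLNESS", "HPI",
   "PAST MEDICAL HISTORY", "PMH", "MEDICATIONS", "ALLERGIES",
   "SOCIAL HISTORY", "PHYSICAL EXAMINATION", "PHYSICAL EXAM",
   "ASSESSMENT", "PLAN", "ASSESSMENT AND PLAN"]

-- any(header in line.strip().upper() for header in section_headers)
def pvIsHeader (line : String) : Bool :=
  pvHeaders.any (fun h => PySem.Str.isIn h (PySem.Str.upper (PySem.Str.strip line)))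

-- line.strip().rstrip(':') — rstrip with an explicit char set is ported by hand
-- (exact: Python removes exactly the maximal trailing run of ':' characters)
def pvSectionName (line : String) : String :=
  String.ofList (((PySem.Str.strip line).toList.reverse.dropWhile (· == ':')).reverse)

-- ===== PORT A =====
-- loop body; state = (sections, current_section, current_content)
def pvStepA (st : PySem.Dict String String × Option String × List String) (line : String) :
    PySem.Dict String String × Option String × List String :=
  if pvIsHeader line then
    let sections :=
      match st.2.1 with
      | some s => if s ≠ "" ∧ st.2.2 ≠ [] then
                    st.1.insert s (PySem.Str.strip (PySem.Str.join "\n" st.2.2))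
                  else st.1
      | none => st.1
    (sections, some (pvSectionName line), [])
  else
    match st.2.1 with
    | some s => if s ≠ "" ∧ PySem.Str.strip line ≠ "" then
                  (st.1, st.2.1, st.2.2 ++ [PySem.Str.strip line])
                else st
    | none => st

def parse_synopsis_sections (text : String) : List (String × String) :=
  let fin := ((PySem.Str.split? text "\n").getD []).foldl pvStepA (PySem.Dict.empty, none, [])
  (match fin.2.1 with
   | some s => if s ≠ "" ∧ fin.2.2 ≠ [] then
                 fin.1.insert s (PySem.Str.strip (PySem.Str.join "\n" fin.2.2))
               else fin.1
   | none => fin.1).items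

-- ===== PORT B =====
-- inner while loop: strip-and-collect body lines until the next header
def pvTakeBody : List String → List String × List String
  | [] => ([], [])
  | l :: rest =>
    if pvIsHeader l then ([], l :: rest)
    else
      let (b, r) := pvTakeBody rest
      (PySem.Str.strip l :: b, r)

-- needed by pvChunk's termination argument
theorem pvTakeBody_len (L : List String) : (pvTakeBody L).2.length ≤ L.length := by
  induction L with
  | nil => simp [pvTakeBody]
  | cons l rest ih =>
    simp only [pvTakeBody]
    split
    · simp
    · simpa using Nat.le_succ_of_le ih

-- outer while loop over the remaining lines
def pvChunk : List String → PySem.Dict String String → PySem.Dict String String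
  | [], d => d
  | line :: rest, d =>
    if pvIsHeader line then
      let p := pvTakeBody rest
      let body := p.1.filter (· ≠ "")
      let d' := if body ≠ [] then
                  d.insert (pvSectionName line) (PySem.Str.strip (PySem.Str.join "\n" body))
                else d
      pvChunk p.2 d'
    else pvChunk rest d
termination_by L _ => L.length
decreasing_by
  · exact Nat.lt_succ_of_le (pvTakeBody_len rest)
  · simp

def parse_synopsis_sections_alt (text : String) : List (String × String) :=
  (pvChunk ((PySem.Str.split? text "\n").getD []) PySem.Dict.empty).items

-- ===== PRECONDITION & SPEC =====
def Spec_parse_synopsis_sections (text : String) (out : List (String × String)) : Prop := out = parse_synopsis_sections_alt text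
instance (text : String) (out : List (String × String)) : Decidable (Spec_parse_synopsis_sections text out) := by unfold Spec_parse_synopsis_sections; infer_instance

-- ===== CLAIM (what is proved, stated in full; the proofs are below) =====
def Claim_equal_parse_synopsis_sections : Prop := ∀ (text : String), Dom_parse_synopsis_sections text → Spec_parse_synopsis_sections text (parse_synopsis_sections text)

-- ===== LEMMAS AND PROOFS =====

-- A's "save previous section" step, shared shape of both ports' inserts
def pvFlush (d : PySem.Dict String String) (name : String) (content : List String) :
    PySem.Dict String String :=
  if name ≠ "" ∧ content ≠ [] then
    d.insert name (PySem.Str.strip (PySem.Str.join "\n" content))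
  else d

-- A's final "save last section"
def pvFin (st : PySem.Dict String String × Option String × List String) :
    PySem.Dict String String :=
  match st.2.1 with
  | some s => pvFlush st.1 s st.2.2
  | none => st.1

theorem pvTakeBody_eq (L : List String) :
    pvTakeBody L = ((L.takeWhile (fun l => !pvIsHeader l)).map PySem.Str.strip,
                    L.dropWhile (fun l => !pvIsHeader l)) := by
  induction L with
  | nil => simp [pvTakeBody]
  | cons l rest ih =>
    simp only [pvTakeBody, List.takeWhile, List.dropWhile]
    cases h : pvIsHeader l <;> simp [ih]

-- every header literal contains a character other than ':'
theorem pvHeaders_nonColon :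
    pvHeaders.all (fun h => h.toList.any (fun c => !(c == ':'))) = true := by decide

-- a header line's section name survives rstrip(':') non-empty
theorem pvSectionName_ne_empty (l : String) (h : pvIsHeader l = true) :
    pvSectionName l ≠ "" := by
  unfold pvIsHeader at h
  rw [List.any_eq_true] at h
  obtain ⟨hd, hmem, hin⟩ := h
  rw [PySem.Str.isIn_iff_infix] at hin
  have hex := (List.all_eq_true.mp pvHeaders_nonColon) hd hmem
  rw [List.any_eq_true] at hex
  obtain ⟨c, hc, hcne'⟩ := hex
  have hcne : c ≠ ':' := by simpa using hcne'
  have hcmem : c ∈ (PySem.Str.upper (PySem.Str.strip l)).toList := hin.subset hc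
  have hup : (PySem.Str.upper (PySem.Str.strip l)).toList
      = (PySem.Str.strip l).toList.map PySem.Chars.upperChar := by
    simp [PySem.Str.upper, PySem.Chars.upper]
  rw [hup, List.mem_map] at hcmem
  obtain ⟨c0, hc0, hc0e⟩ := hcmem
  have hc0ne : c0 ≠ ':' := by
    intro he; subst he
    exact hcne (by rw [← hc0e]; decide)
  unfold pvSectionName
  intro he
  have h0 : (((PySem.Str.strip l).toList.reverse.dropWhile (· == ':')).reverse) = [] := by
    have := congrArg String.toList he; simpa using this
  rw [List.reverse_eq_nil_iff, List.dropWhile_eq_nil_iff] at h0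
  exact hc0ne (by simpa using h0 c0 (by simpa using hc0))

theorem pvStepA_header (d : PySem.Dict String String) (cur : Option String)
    (content : List String) (l : String) (h : pvIsHeader l = true) :
    pvStepA (d, cur, content) l =
      ((match cur with | some s => pvFlush d s content | none => d),
       some (pvSectionName l), []) := by
  cases cur <;> simp [pvStepA, pvFlush, h]

theorem pvStepA_nonheader (d : PySem.Dict String String) (name : String)
    (content : List String) (l : String) (h : pvIsHeader l = false) (hname : name ≠ "") :
    pvStepA (d, some name, content) l =
      (d, some name, content ++ (if PySem.Str.strip l = "" then [] else [PySem.Str.strip l])) := by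
  simp only [pvStepA, h, Bool.false_eq_true, if_false]
  by_cases hs : PySem.Str.strip l = "" <;> simp [hs, hname]

theorem pvStepA_none (d : PySem.Dict String String) (content : List String)
    (l : String) (h : pvIsHeader l = false) :
    pvStepA (d, none, content) l = (d, none, content) := by
  simp [pvStepA, h]

theorem pvFilter_strip (l : String) (tl : List String) :
    ((l :: tl).map PySem.Str.strip).filter (· ≠ "") =
      (if PySem.Str.strip l = "" then [] else [PySem.Str.strip l])
        ++ (tl.map PySem.Str.strip).filter (· ≠ "") := by
  by_cases hs : PySem.Str.strip l = "" <;> simp [hs]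

-- MAIN INVARIANT: from a live-section state, A's remaining fold equals B's chunk loop
theorem pvMain (L : List String) (d : PySem.Dict String String) (name : String)
    (content : List String) (hname : name ≠ "") :
    pvFin (L.foldl pvStepA (d, some name, content)) =
      pvChunk (L.dropWhile (fun l => !pvIsHeader l))
        (pvFlush d name (content ++
          ((L.takeWhile (fun l => !pvIsHeader l)).map PySem.Str.strip).filter (· ≠ ""))) := by
  induction L generalizing d name content with
  | nil => simp [pvFin, pvChunk]
  | cons l rest ih =>
    rw [List.foldl_cons, List.takeWhile_cons, List.dropWhile_cons]
    cases h : pvIsHeader l with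
    | true =>
      simp only [Bool.not_true, Bool.false_eq_true, if_false, List.map_nil,
        List.filter_nil, List.append_nil]
      rw [pvStepA_header _ _ _ _ h, ih _ _ _ (pvSectionName_ne_empty l h)]
      conv_rhs => rw [pvChunk.eq_def]
      simp only [h, if_true, pvTakeBody_eq, List.nil_append]
      simp [pvFlush, pvSectionName_ne_empty l h]
    | false =>
      simp only [Bool.not_false, if_true]
      rw [pvStepA_nonheader _ _ _ _ h hname, ih _ _ _ hname, pvFilter_strip]
      simp [List.append_assoc]

-- from the initial no-section state
theorem pvTop (L : List String) :
    pvFin (L.foldl pvStepA (PySem.Dict.empty, none, [])) = pvChunk L PySem.Dict.empty := by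
  induction L with
  | nil => simp [pvFin, pvChunk]
  | cons l rest ih =>
    rw [List.foldl_cons]
    cases h : pvIsHeader l with
    | true =>
      rw [pvStepA_header _ _ _ _ h, pvMain _ _ _ _ (pvSectionName_ne_empty l h)]
      conv_rhs => rw [pvChunk.eq_def]
      simp only [h, if_true, pvTakeBody_eq, List.nil_append]
      simp [pvFlush, pvSectionName_ne_empty l h]
    | false =>
      rw [pvStepA_none _ _ _ h]
      conv_rhs => rw [pvChunk.eq_def]
      simp [h, ih]

-- ===== VERDICT (by name: the statement is the Claim_ definition above) =====
theorem parse_synopsis_sections_spec : Claim_equal_parse_synopsis_sections := by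
  intro text _
  unfold Spec_parse_synopsis_sections parse_synopsis_sections parse_synopsis_sections_alt
  rw [← pvTop ((PySem.Str.split? text "\n").getD [])]
  rfl
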